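-- pv_equiv track=rewrite | github.com/hanz-01105/demo-practice | base_files/prototype/final_with_occupation_analysis.py | group_similar_occupations
-- ===== SOURCE A (Python) =====
-- from typing import Dict, List, Any, Optional, Tuple
--
-- def group_similar_occupations(occupations: List[str]) -> List[str]:
--     """Group similar occupation types into broader categories"""
--
--     occupation_groups = {
--         'Professional/Knowledge': [],
--         'Healthcare': [],
--         'Education': [],
--         'Technical': [],
--         'Service': [],
--         'Other': []
--     }
--
--     for occupation in occupations:
--         occ_lower = occupation.lower()
--
--         if any(word in occ_lower for word in ['doctor', 'nurse', 'medical', 'health']):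
--             occupation_groups['Healthcare'].append(occupation)
--         elif any(word in occ_lower for word in ['teacher', 'professor', 'education', 'student']):
--             occupation_groups['Education'].append(occupation)
--         elif any(word in occ_lower for word in ['engineer', 'technical', 'programmer', 'developer']):
--             occupation_groups['Technical'].append(occupation)
--         elif any(word in occ_lower for word in ['professional', 'manager', 'analyst', 'consultant']):
--             occupation_groups['Professional/Knowledge'].append(occupation)
--         elif any(word in occ_lower for word in ['service', 'retail', 'customer']):
--             occupation_groups['Service'].append(occupation)
--         else:
--             occupation_groups['Other'].append(occupation)
--
--     # Return only groups that have members
--     grouped_categories = [group for group, members in occupation_groups.items() if members]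
--
--     # If still too many, combine smaller groups
--     if len(grouped_categories) > 6:
--         # Combine smaller groups into "Other"
--         large_groups = [group for group, members in occupation_groups.items() if len(members) >= 2]
--         if len(large_groups) <= 6:
--             return large_groups
--
--     return grouped_categories[:6]  # Limit to 6 categories max
-- ===== SOURCE B (Python) =====
-- from typing import List
--
-- _KEYWORDS = {
--     'Healthcare': ['doctor', 'nurse', 'medical', 'health'],
--     'Education': ['teacher', 'professor', 'education', 'student'],
--     'Technical': ['engineer', 'technical', 'programmer', 'developer'],
--     'Professional/Knowledge': ['professional', 'manager', 'analyst', 'consultant'],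
--     'Service': ['service', 'retail', 'customer'],
-- }
-- _PRIORITY = ['Healthcare', 'Education', 'Technical', 'Professional/Knowledge', 'Service']
-- _DISPLAY = ['Professional/Knowledge', 'Healthcare', 'Education',
--             'Technical', 'Service', 'Other']
--
--
-- def _matches(low: str, words: List[str]) -> bool:
--     return any(w in low for w in words)
--
--
-- def _present(lows: List[str], cat: str) -> bool:
--     """Is some occupation assigned to this category? Category-major check:
--     a string counts for cat iff it matches cat's keywords and no
--     higher-priority category's keywords ('Other' = matches none)."""
--     if cat == 'Other':
--         return any(not any(_matches(l, _KEYWORDS[c]) for c in _PRIORITY)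
--                    for l in lows)
--     earlier = _PRIORITY[:_PRIORITY.index(cat)]
--     return any(_matches(l, _KEYWORDS[cat]) and
--                not any(_matches(l, _KEYWORDS[c]) for c in earlier)
--                for l in lows)
--
--
-- def group_similar_occupations(occupations: List[str]) -> List[str]:
--     lows = [o.lower() for o in occupations]
--     return [c for c in _DISPLAY if _present(lows, c)]
-- ===== Notes on version B (the rewrite author's own statement) =====
-- stated objective: alternative
-- what changed: Inverts the loop nesting: instead of classifying each occupation into per-category member lists via an if/elif chain, B loops over the six categories and tests per category whether some lowercased occupation matches its keywords and no higher-priority category's keywords ('Other' = matches none), emitting the category names directly.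
import Mathlib
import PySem

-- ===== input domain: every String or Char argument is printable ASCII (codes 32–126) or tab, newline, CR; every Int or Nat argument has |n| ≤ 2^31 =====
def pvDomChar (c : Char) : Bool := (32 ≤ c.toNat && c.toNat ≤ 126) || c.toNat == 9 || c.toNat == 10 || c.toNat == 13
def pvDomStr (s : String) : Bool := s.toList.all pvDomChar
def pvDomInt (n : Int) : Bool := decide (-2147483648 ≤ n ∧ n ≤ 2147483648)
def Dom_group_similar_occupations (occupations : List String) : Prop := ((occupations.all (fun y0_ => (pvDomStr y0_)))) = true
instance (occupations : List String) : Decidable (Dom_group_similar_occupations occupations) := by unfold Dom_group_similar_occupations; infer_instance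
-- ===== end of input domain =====

-- B inverts the loop nesting: A classifies each occupation into per-category member lists via
-- an if/elif chain; B loops over the six categories and asks, per category, whether some
-- lowercased occupation matches its keywords and no higher-priority category's keywords
-- ('Other' = matches none).  Alternative decomposition, same asymptotic cost.

-- ===== PORT A =====
def group_similar_occupations (occupations : List String) : List String :=
  let g0 : PySem.Dict String (List String) := PySem.Dict.ofList
    [("Professional/Knowledge", []), ("Healthcare", []), ("Education", []),
     ("Technical", []), ("Service", []), ("Other", [])]
  let g := occupations.foldl (fun d occupation =>
    let occLower := PySem.Str.lower occupation
    if (["doctor", "nurse", "medical", "health"] : List String).any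
        (fun w => PySem.Str.isIn w occLower) then
      d.modify "Healthcare" [] (fun l => l ++ [occupation])
    else if (["teacher", "professor", "education", "student"] : List String).any
        (fun w => PySem.Str.isIn w occLower) then
      d.modify "Education" [] (fun l => l ++ [occupation])
    else if (["engineer", "technical", "programmer", "developer"] : List String).any
        (fun w => PySem.Str.isIn w occLower) then
      d.modify "Technical" [] (fun l => l ++ [occupation])
    else if (["professional", "manager", "analyst", "consultant"] : List String).any
        (fun w => PySem.Str.isIn w occLower) then
      d.modify "Professional/Knowledge" [] (fun l => l ++ [occupation])
    else if (["service", "retail", "customer"] : List String).any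
        (fun w => PySem.Str.isIn w occLower) then
      d.modify "Service" [] (fun l => l ++ [occupation])
    else
      d.modify "Other" [] (fun l => l ++ [occupation])) g0
  let groupedCategories := (g.items.filter (fun p => !p.2.isEmpty)).map (fun p => p.1)
  if 6 < groupedCategories.length then
    let largeGroups := (g.items.filter (fun p => 2 ≤ p.2.length)).map (fun p => p.1)
    if largeGroups.length ≤ 6 then largeGroups
    else PySem.List.slice groupedCategories none (some 6)
  else PySem.List.slice groupedCategories none (some 6)

-- ===== PORT B =====
def pvKeywords : PySem.Dict String (List String) := PySem.Dict.ofList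
  [("Healthcare", ["doctor", "nurse", "medical", "health"]),
   ("Education", ["teacher", "professor", "education", "student"]),
   ("Technical", ["engineer", "technical", "programmer", "developer"]),
   ("Professional/Knowledge", ["professional", "manager", "analyst", "consultant"]),
   ("Service", ["service", "retail", "customer"])]

def pvPriority : List String :=
  ["Healthcare", "Education", "Technical", "Professional/Knowledge", "Service"]

def pvDisplay : List String :=
  ["Professional/Knowledge", "Healthcare", "Education", "Technical", "Service", "Other"]

def pvMatchesB (low : String) (words : List String) : Bool :=
  words.any (fun w => PySem.Str.isIn w low)

-- _KEYWORDS[c] ported as getD (every looked-up key is present); _PRIORITY.index(cat) via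
-- PySem.List.index? (cat is always found, so the Python never raises)
def pvPresent (lows : List String) (cat : String) : Bool :=
  if cat == "Other" then
    lows.any (fun l => !(pvPriority.any (fun c => pvMatchesB l (pvKeywords.getD c []))))
  else
    let earlier := PySem.List.slice pvPriority none
      ((PySem.List.index? pvPriority cat).map (fun i => (i : Int)))
    lows.any (fun l => pvMatchesB l (pvKeywords.getD cat []) &&
      !(earlier.any (fun c => pvMatchesB l (pvKeywords.getD c []))))

def group_similar_occupations_alt (occupations : List String) : List String :=
  let lows := occupations.map (fun o => PySem.Str.lower o)
  pvDisplay.filter (fun c => pvPresent lows c)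

-- ===== PRECONDITION & SPEC =====
def Spec_group_similar_occupations (occupations : List String) (out : List String) : Prop := out = group_similar_occupations_alt occupations
instance (occupations : List String) (out : List String) : Decidable (Spec_group_similar_occupations occupations out) := by unfold Spec_group_similar_occupations; infer_instance

-- ===== CLAIM (what is proved, stated in full; the proofs are below) =====
def Claim_equal_group_similar_occupations : Prop := ∀ (occupations : List String), Dom_group_similar_occupations occupations → Spec_group_similar_occupations occupations (group_similar_occupations occupations)

-- ===== LEMMAS AND PROOFS =====

-- the category A's if/elif chain assigns to a lowercased occupation (proof-only helper)
def pvCatL (l : String) : String :=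
  if pvMatchesB l ["doctor", "nurse", "medical", "health"] then "Healthcare"
  else if pvMatchesB l ["teacher", "professor", "education", "student"] then "Education"
  else if pvMatchesB l ["engineer", "technical", "programmer", "developer"] then "Technical"
  else if pvMatchesB l ["professional", "manager", "analyst", "consultant"] then "Professional/Knowledge"
  else if pvMatchesB l ["service", "retail", "customer"] then "Service"
  else "Other"

-- A's loop body is exactly "modify the category of this occupation"
theorem stepA_eq (d : PySem.Dict String (List String)) (o : String) :
    (if (["doctor", "nurse", "medical", "health"] : List String).any
         (fun w => PySem.Str.isIn w (PySem.Str.lower o)) then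
       d.modify "Healthcare" [] (fun l => l ++ [o])
     else if (["teacher", "professor", "education", "student"] : List String).any
         (fun w => PySem.Str.isIn w (PySem.Str.lower o)) then
       d.modify "Education" [] (fun l => l ++ [o])
     else if (["engineer", "technical", "programmer", "developer"] : List String).any
         (fun w => PySem.Str.isIn w (PySem.Str.lower o)) then
       d.modify "Technical" [] (fun l => l ++ [o])
     else if (["professional", "manager", "analyst", "consultant"] : List String).any
         (fun w => PySem.Str.isIn w (PySem.Str.lower o)) then
       d.modify "Professional/Knowledge" [] (fun l => l ++ [o])
     else if (["service", "retail", "customer"] : List String).any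
         (fun w => PySem.Str.isIn w (PySem.Str.lower o)) then
       d.modify "Service" [] (fun l => l ++ [o])
     else
       d.modify "Other" [] (fun l => l ++ [o])) =
    d.modify (pvCatL (PySem.Str.lower o)) [] (fun l => l ++ [o]) := by
  simp only [pvCatL, pvMatchesB]
  split_ifs <;> rfl

-- every occupation lands in one of the six display categories
theorem catL_mem (l : String) : pvCatL l ∈ pvDisplay := by
  unfold pvCatL
  split_ifs <;> simp [pvDisplay]

-- the initial dict maps every key to []
theorem g0_getD (c : String) :
    (PySem.Dict.ofList
      [("Professional/Knowledge", ([] : List String)), ("Healthcare", []), ("Education", []),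
       ("Technical", []), ("Service", []), ("Other", [])]).getD c [] = [] := by
  have h : PySem.Dict.ofList
      [("Professional/Knowledge", ([] : List String)), ("Healthcare", []), ("Education", []),
       ("Technical", []), ("Service", []), ("Other", [])] = PySem.Dict.mk
      [("Professional/Knowledge", []), ("Healthcare", []), ("Education", []),
       ("Technical", []), ("Service", []), ("Other", [])] := by rfl
  rw [h]
  simp only [PySem.Dict.getD_eq_get?_getD, PySem.Dict.get?_mk_cons]
  split_ifs <;> rfl

-- a dict with Nodup keys is its key list paired with its lookups
theorem items_eq_aux (l : List (String × List String)) (h : (l.map Prod.fst).Nodup) :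
    l = (l.map Prod.fst).map (fun k => (k, (PySem.Dict.mk l).getD k [])) := by
  induction l with
  | nil => simp
  | cons p t ih =>
    obtain ⟨a, v⟩ := p
    simp only [List.map_cons, List.nodup_cons] at h
    obtain ⟨hp, ht⟩ := h
    have hhead : (PySem.Dict.mk ((a, v) :: t)).getD a [] = v := by
      simp [PySem.Dict.getD_eq_get?_getD, PySem.Dict.get?_mk_cons]
    have htail : ∀ k ∈ t.map Prod.fst,
        (fun k => (k, (PySem.Dict.mk ((a, v) :: t)).getD k [])) k
          = (fun k => (k, (PySem.Dict.mk t).getD k [])) k := by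
      intro k hk
      have hne : ¬ (a == k) = true := by
        simp only [beq_iff_eq]; rintro rfl; exact hp hk
      simp [PySem.Dict.getD_eq_get?_getD, PySem.Dict.get?_mk_cons, hne]
    simp only [List.map_cons]
    rw [List.map_congr_left htail, ← ih ht]
    simp [hhead]

-- A's whole loop, rewritten through stepA_eq
theorem foldA_eq (l : List String) (d : PySem.Dict String (List String)) :
    l.foldl (fun d occupation =>
      if (["doctor", "nurse", "medical", "health"] : List String).any
          (fun w => PySem.Str.isIn w (PySem.Str.lower occupation)) then
        d.modify "Healthcare" [] (fun l => l ++ [occupation])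
      else if (["teacher", "professor", "education", "student"] : List String).any
          (fun w => PySem.Str.isIn w (PySem.Str.lower occupation)) then
        d.modify "Education" [] (fun l => l ++ [occupation])
      else if (["engineer", "technical", "programmer", "developer"] : List String).any
          (fun w => PySem.Str.isIn w (PySem.Str.lower occupation)) then
        d.modify "Technical" [] (fun l => l ++ [occupation])
      else if (["professional", "manager", "analyst", "consultant"] : List String).any
          (fun w => PySem.Str.isIn w (PySem.Str.lower occupation)) then
        d.modify "Professional/Knowledge" [] (fun l => l ++ [occupation])
      else if (["service", "retail", "customer"] : List String).any
          (fun w => PySem.Str.isIn w (PySem.Str.lower occupation)) then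
        d.modify "Service" [] (fun l => l ++ [occupation])
      else
        d.modify "Other" [] (fun l => l ++ [occupation])) d
    = l.foldl (fun d o => d.modify (pvCatL (PySem.Str.lower o)) [] (fun l => l ++ [o])) d :=
  by apply PySem.List.foldl_congr_mem; intro acc x _; exact stepA_eq acc x

-- B's per-category test sees exactly the strings A's chain assigns to that category
theorem kwH : pvKeywords.getD "Healthcare" [] = ["doctor", "nurse", "medical", "health"] := by decide
theorem kwE : pvKeywords.getD "Education" [] = ["teacher", "professor", "education", "student"] := by decide
theorem kwT : pvKeywords.getD "Technical" [] = ["engineer", "technical", "programmer", "developer"] := by decide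
theorem kwP : pvKeywords.getD "Professional/Knowledge" [] = ["professional", "manager", "analyst", "consultant"] := by decide
theorem kwS : pvKeywords.getD "Service" [] = ["service", "retail", "customer"] := by decide
theorem earlH : PySem.List.slice ["Healthcare", "Education", "Technical", "Professional/Knowledge", "Service"] none ((List.idxOf? "Healthcare" ["Healthcare", "Education", "Technical", "Professional/Knowledge", "Service"]).bind fun a => some (a : Int)) = [] := by decide
theorem earlE : PySem.List.slice ["Healthcare", "Education", "Technical", "Professional/Knowledge", "Service"] none ((List.idxOf? "Education" ["Healthcare", "Education", "Technical", "Professional/Knowledge", "Service"]).bind fun a => some (a : Int)) = ["Healthcare"] := by decide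
theorem earlT : PySem.List.slice ["Healthcare", "Education", "Technical", "Professional/Knowledge", "Service"] none ((List.idxOf? "Technical" ["Healthcare", "Education", "Technical", "Professional/Knowledge", "Service"]).bind fun a => some (a : Int)) = ["Healthcare", "Education"] := by decide
theorem earlP : PySem.List.slice ["Healthcare", "Education", "Technical", "Professional/Knowledge", "Service"] none ((List.idxOf? "Professional/Knowledge" ["Healthcare", "Education", "Technical", "Professional/Knowledge", "Service"]).bind fun a => some (a : Int)) = ["Healthcare", "Education", "Technical"] := by decide
theorem earlS : PySem.List.slice ["Healthcare", "Education", "Technical", "Professional/Knowledge", "Service"] none ((List.idxOf? "Service" ["Healthcare", "Education", "Technical", "Professional/Knowledge", "Service"]).bind fun a => some (a : Int)) = ["Healthcare", "Education", "Technical", "Professional/Knowledge"] := by decide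

theorem present_eq (lows : List String) (k : String) (hk : k ∈ pvDisplay) :
    pvPresent lows k = lows.any (fun l => pvCatL l == k) := by
  simp only [pvDisplay, List.mem_cons, List.not_mem_nil, or_false] at hk
  rcases hk with rfl | rfl | rfl | rfl | rfl | rfl <;>
  · simp only [pvPresent, String.reduceBEq, Bool.false_eq_true, reduceIte,
      PySem.List.index?_eq_idxOf?, Option.pure_def, Option.bind_eq_bind, Option.map_bind,
      Option.map_id_fun', Function.comp_apply, id_eq]
    congr 1
    funext l
    cases h1 : pvMatchesB l ["doctor", "nurse", "medical", "health"] <;>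
    cases h2 : pvMatchesB l ["teacher", "professor", "education", "student"] <;>
    cases h3 : pvMatchesB l ["engineer", "technical", "programmer", "developer"] <;>
    cases h4 : pvMatchesB l ["professional", "manager", "analyst", "consultant"] <;>
    cases h5 : pvMatchesB l ["service", "retail", "customer"] <;>
    simp [pvCatL, pvPriority, kwH, kwE, kwT, kwP, kwS, earlH, earlE, earlT, earlP, earlS,
      h1, h2, h3, h4, h5]

set_option maxHeartbeats 4000000 in
theorem group_similar_occupations_spec : Claim_equal_group_similar_occupations := by
  intro occupations _
  unfold Spec_group_similar_occupations group_similar_occupations group_similar_occupations_alt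
  simp only []
  rw [foldA_eq]
  set g0 : PySem.Dict String (List String) := PySem.Dict.ofList
    [("Professional/Knowledge", []), ("Healthcare", []), ("Education", []),
     ("Technical", []), ("Service", []), ("Other", [])] with hg0
  set gF := occupations.foldl
    (fun d o => d.modify (pvCatL (PySem.Str.lower o)) [] (fun l => l ++ [o])) g0 with hgF
  -- value of every entry of the final dict
  have hval : ∀ c, gF.getD c [] =
      occupations.filter (fun o => pvCatL (PySem.Str.lower o) == c) := by
    intro c
    have := PySem.Dict.getD_foldl_modify_append
      (occupations.map (fun o => (pvCatL (PySem.Str.lower o), o))) g0 c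
    rw [List.foldl_map] at this
    rw [hgF, this, hg0, g0_getD]
    rw [List.filter_map, List.map_map, List.nil_append,
      show ((fun x : String × String => x.2) ∘
        fun o : String => (pvCatL (PySem.Str.lower o), o)) = id from rfl,
      List.map_id]
    rfl
  -- keys of the final dict are exactly the display list
  have hkeys : gF.keys = pvDisplay := by
    rw [hgF, PySem.Dict.keys_foldl_modify_key]
    have hk0 : g0.keys = pvDisplay := by rw [hg0]; rfl
    rw [hk0, PySem.Set.update_eq_append_filter]
    have : (PySem.Set.ofList (occupations.map (fun o => pvCatL (PySem.Str.lower o)))).filter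
        (fun y => !(PySem.Set.contains pvDisplay y)) = [] := by
      rw [List.filter_eq_nil_iff]
      intro a ha
      have : a ∈ occupations.map (fun o => pvCatL (PySem.Str.lower o)) :=
        (PySem.Set.mem_ofList _ a).mp ha
      obtain ⟨o, _, rfl⟩ := List.mem_map.mp this
      simp [catL_mem (PySem.Str.lower o)]
    rw [this, List.append_nil]
  have hnodup : (gF.items.map Prod.fst).Nodup := by
    have : gF.keys = gF.items.map Prod.fst := rfl
    rw [← this, hkeys]; decide
  have hitems : gF.items = pvDisplay.map (fun k => (k, gF.getD k [])) := by
    have := items_eq_aux gF.items hnodup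
    have hk : gF.items.map Prod.fst = gF.keys := rfl
    rw [hk, hkeys] at this
    exact this
  -- A's category list is a filter of the display list
  have hgrouped : (gF.items.filter (fun p => !p.2.isEmpty)).map (fun p => p.1)
      = pvDisplay.filter
          (fun k => !(occupations.filter
            (fun o => pvCatL (PySem.Str.lower o) == k)).isEmpty) := by
    rw [hitems, List.filter_map, List.map_map]
    have h1 : ((fun p : String × List String => p.1) ∘ fun k => (k, gF.getD k []))
        = id := rfl
    rw [h1, List.map_id]
    apply List.filter_congr
    intro k _
    simp [Function.comp, hval k]
  rw [hgrouped]
  set grouped := pvDisplay.filter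
    (fun k => !(occupations.filter (fun o => pvCatL (PySem.Str.lower o) == k)).isEmpty)
    with hgr
  -- at most six categories exist, so the "combine" branch is dead and the slice is the identity
  have hlen : grouped.length ≤ 6 := by
    have := List.length_filter_le
      (fun k => !(occupations.filter (fun o => pvCatL (PySem.Str.lower o) == k)).isEmpty)
      pvDisplay
    simpa [hgr] using this
  have hnotlt : ¬ 6 < grouped.length := by omega
  rw [if_neg hnotlt]
  have hslice : PySem.List.slice grouped none (some 6) = grouped := by
    rw [PySem.List.slice_to grouped (by norm_num)]
    exact List.take_of_length_le (by simpa using hlen)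
  rw [hslice, hgr]
  -- the two filters of the display list agree pointwise
  apply List.filter_congr
  intro k hk
  rw [present_eq _ k hk, List.any_map]
  rw [Bool.eq_iff_iff]
  simp only [Bool.not_eq_true', List.isEmpty_eq_false_iff, ne_eq, List.filter_eq_nil_iff,
    List.any_eq_true, Function.comp, not_forall]
  tauto
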